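-- pv_equiv track=rewrite | github.com/SelinaWang-24998/bolt_detect | sdcard/examples/03-Machine/fft_display.py | aggregate_bins
-- ===== SOURCE A (Python) =====
-- def aggregate_bins(values, out_count):
-- 	if out_count <= 0:
-- 		return []
--
-- 	src_count = len(values)
-- 	if src_count <= out_count:
-- 		return values[:]
--
-- 	buckets = []
-- 	for idx in range(out_count):
-- 		start = (idx * src_count) // out_count
-- 		end = ((idx + 1) * src_count) // out_count
-- 		if end <= start:
-- 			end = start + 1
--
-- 		peak = 0
-- 		for pos in range(start, end):
-- 			val = values[pos]
-- 			if val > peak: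
-- 				peak = val
-- 		buckets.append(peak)
--
-- 	return buckets
-- ===== SOURCE B (Python) =====
-- def aggregate_bins(values, out_count):
--     if out_count <= 0:
--         return []
--
--     src_count = len(values)
--     if src_count <= out_count:
--         return values[:]
--
--     buckets = []
--     peak = 0
--     idx = 0
--     nxt = src_count // out_count  # end of bucket 0
--     for pos, val in enumerate(values):
--         if pos == nxt:
--             buckets.append(peak)
--             peak = 0
--             idx += 1
--             nxt = ((idx + 1) * src_count) // out_count
--         if val > peak:
--             peak = val
--     buckets.append(peak)
--     return buckets
-- ===== Notes on version B (the rewrite author's own statement) =====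
-- stated objective: alternative
-- what changed: Replaces A's nested per-bucket loops (outer loop over bucket indices, inner loop re-scanning each index range) by a single flat pass over the values that keeps a running peak and an advancing bucket boundary, emitting a bucket each time the boundary is reached.
import Mathlib
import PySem

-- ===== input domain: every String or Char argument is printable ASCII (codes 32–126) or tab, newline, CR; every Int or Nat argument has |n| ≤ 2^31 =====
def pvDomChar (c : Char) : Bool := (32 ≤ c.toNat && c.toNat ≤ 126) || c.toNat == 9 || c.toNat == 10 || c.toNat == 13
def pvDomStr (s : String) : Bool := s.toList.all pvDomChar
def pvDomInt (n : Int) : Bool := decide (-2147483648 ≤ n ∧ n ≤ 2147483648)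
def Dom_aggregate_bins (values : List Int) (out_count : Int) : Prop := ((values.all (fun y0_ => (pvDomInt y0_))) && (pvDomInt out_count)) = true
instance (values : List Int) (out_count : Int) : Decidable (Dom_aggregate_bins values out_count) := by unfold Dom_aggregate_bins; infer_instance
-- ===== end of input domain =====

-- B replaces A's nested per-bucket loops by a single flat pass over the values with a
-- running peak and an advancing bucket boundary (objective: alternative decomposition,
-- same O(n) cost); return values only, no mutation on either side.

-- ===== PORT A =====
-- A's inner loop body: 'val = values[pos]; if val > peak: peak = val'
-- (values[pos] ported as pyGetD with default 0: every pos produced by A's ranges is in range)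
def pvAInner (values : List Int) (peak pos : Int) : Int :=
  let val := PySem.List.pyGetD values pos 0
  if val > peak then val else peak

def aggregate_bins (values : List Int) (out_count : Int) : List Int :=
  if out_count ≤ 0 then []
  else
    let src_count : Int := values.length
    if src_count ≤ out_count then values
    else
      (PySem.List.pyRange 0 out_count).foldl (fun buckets idx =>
        let start := PySem.Int.floordiv (idx * src_count) out_count
        let end0 := PySem.Int.floordiv ((idx + 1) * src_count) out_count
        let end_ := if end0 ≤ start then start + 1 else end0
        let peak := (PySem.List.pyRange start end_).foldl (pvAInner values) 0
        buckets ++ [peak]) []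

-- ===== PORT B =====
-- B's loop body: state (buckets, peak, idx, nxt); on pos == nxt emit peak and advance
-- the boundary, then fold the current value into the running peak.
def pvBStep (src_count out_count : Int)
    (s : List Int × Int × Int × Int) (pv : Int × Int) : List Int × Int × Int × Int :=
  let s1 := if pv.1 == s.2.2.2 then
      (s.1 ++ [s.2.1], (0 : Int), s.2.2.1 + 1,
       PySem.Int.floordiv ((s.2.2.1 + 1 + 1) * src_count) out_count)
    else s
  if pv.2 > s1.2.1 then (s1.1, pv.2, s1.2.2.1, s1.2.2.2) else s1

def aggregate_bins_alt (values : List Int) (out_count : Int) : List Int :=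
  if out_count ≤ 0 then []
  else
    let src_count : Int := values.length
    if src_count ≤ out_count then values
    else
      let st := (PySem.List.enumerate values).foldl (pvBStep src_count out_count)
        ([], 0, 0, PySem.Int.floordiv src_count out_count)
      st.1 ++ [st.2.1]

-- ===== PRECONDITION & SPEC =====
def Spec_aggregate_bins (values : List Int) (out_count : Int) (out : List Int) : Prop := out = aggregate_bins_alt values out_count
instance (values : List Int) (out_count : Int) (out : List Int) : Decidable (Spec_aggregate_bins values out_count out) := by unfold Spec_aggregate_bins; infer_instance

-- ===== CLAIM (what is proved, stated in full; the proofs are below) =====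
def Claim_equal_aggregate_bins : Prop := ∀ (values : List Int) (out_count : Int), Dom_aggregate_bins values out_count → Spec_aggregate_bins values out_count (aggregate_bins values out_count)

-- ===== LEMMAS AND PROOFS =====

-- the bucket boundary: Bnd n o k = (k*n) // o
def Bnd (n o k : Int) : Int := PySem.Int.floordiv (k * n) o

lemma floordiv_eq_ediv (a b : Int) (hb : 0 < b) : PySem.Int.floordiv a b = a / b := by
  simp [PySem.Int.floordiv, Int.fdiv_eq_ediv, Or.inl hb.le]

lemma Bnd_zero (n o : Int) : Bnd n o 0 = 0 := by
  simp [Bnd, PySem.Int.floordiv]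

lemma Bnd_self (n o : Int) (ho : 0 < o) : Bnd n o o = n := by
  rw [Bnd, floordiv_eq_ediv _ _ ho, Int.mul_ediv_cancel_left _ ho.ne']

lemma Bnd_mono (n o : Int) (ho : 0 < o) (hn : 0 ≤ n) {i j : Int} (h : i ≤ j) :
    Bnd n o i ≤ Bnd n o j := by
  rw [Bnd, Bnd, floordiv_eq_ediv _ _ ho, floordiv_eq_ediv _ _ ho]
  exact Int.ediv_le_ediv ho (by nlinarith)

lemma Bnd_strict (n o : Int) (ho : 0 < o) (hn : o < n) (k : Int) :
    Bnd n o k < Bnd n o (k + 1) := by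
  rw [Bnd, Bnd, floordiv_eq_ediv _ _ ho, floordiv_eq_ediv _ _ ho]
  have h1 : (k * n + 1 * o) / o ≤ ((k + 1) * n) / o :=
    Int.ediv_le_ediv ho (by nlinarith)
  rw [Int.add_mul_ediv_right _ _ ho.ne'] at h1
  omega

-- the flat fold ignores the boundary inside a bucket segment and just accumulates the peak
lemma segFold (values : List Int) (n o : Int) :
    ∀ (d : Nat) (a b : Int), (b - a).toNat = d → ∀ (acc : List Int) (peak idx nxt : Int), b ≤ nxt →
    ((PySem.List.pyRange a b).map (fun j => (j, PySem.List.pyGetD values j 0))).foldl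
        (pvBStep n o) (acc, peak, idx, nxt)
      = (acc, (PySem.List.pyRange a b).foldl (pvAInner values) peak, idx, nxt) := by
  intro d
  induction d with
  | zero =>
    intro a b hd acc peak idx nxt hb
    rw [PySem.List.pyRange_one_eq_nil (by omega)]
    simp
  | succ d ih =>
    intro a b hd acc peak idx nxt hb
    have hab : a < b := by omega
    rw [PySem.List.pyRange_one_cons hab]
    simp only [List.map_cons, List.foldl_cons]
    have hne : (a == nxt) = false := by simp; omega
    have hstep : pvBStep n o (acc, peak, idx, nxt) (a, PySem.List.pyGetD values a 0)
        = (acc, pvAInner values peak a, idx, nxt) := by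
      simp only [pvBStep, pvAInner, hne, Bool.false_eq_true, if_false]
      split <;> rfl
    rw [hstep, ih (a + 1) b (by omega) acc _ idx nxt hb]

-- one bucket-sized chunk of B's flat pass produces one bucket of A, then recurses
lemma mainFold (values : List Int) (o : Int) (ho : 0 < o) (hn : o < (values.length : Int)) :
    ∀ (d : Nat) (k : Int), 0 ≤ k → k < o → (o - k).toNat = d → ∀ (acc : List Int),
    (let r := ((PySem.List.pyRange (Bnd (values.length : Int) o k) (values.length : Int)).map
        (fun j => (j, PySem.List.pyGetD values j 0))).foldl (pvBStep (values.length : Int) o)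
        (acc, 0, k, Bnd (values.length : Int) o (k + 1));
     r.1 ++ [r.2.1])
      = acc ++ (PySem.List.pyRange k o).map (fun i =>
          (PySem.List.pyRange (Bnd (values.length : Int) o i)
            (Bnd (values.length : Int) o (i + 1))).foldl (pvAInner values) 0) := by
  set n : Int := (values.length : Int) with hnn
  have hn0 : 0 ≤ n := by positivity
  intro d
  induction d with
  | zero => intro k hk0 hko hd; omega
  | succ d ih =>
    intro k hk0 hko hd acc
    have hBk : Bnd n o k < Bnd n o (k + 1) := Bnd_strict n o ho hn k
    have hBk1 : Bnd n o (k + 1) ≤ n := by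
      have := Bnd_mono n o ho hn0 (show k + 1 ≤ o by omega)
      rwa [Bnd_self n o ho] at this
    have hsplit := PySem.List.pyRange_one_append (Bnd n o k) (Bnd n o (k + 1)) n hBk.le hBk1
    rw [hsplit, List.map_append, List.foldl_append]
    rw [segFold values n o (Bnd n o (k + 1) - Bnd n o k).toNat _ _ rfl acc 0 k (Bnd n o (k + 1)) le_rfl]
    by_cases hlast : k + 1 = o
    · -- last bucket: the rest of the range is empty
      subst hlast
      have hBself := Bnd_self n (k + 1) ho
      rw [hBself, PySem.List.pyRange_one_eq_nil le_rfl, PySem.List.pyRange_one_singleton]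
      simp [hBself]
    · -- boundary element starts bucket k+1, then the IH applies from there
      have hk1o : k + 1 < o := by omega
      have hBnext : Bnd n o (k + 1) < Bnd n o (k + 1 + 1) := Bnd_strict n o ho hn (k + 1)
      have hB2 : Bnd n o (k + 1 + 1) ≤ n := by
        have := Bnd_mono n o ho hn0 (show k + 1 + 1 ≤ o by omega)
        rwa [Bnd_self n o ho] at this
      have hBltn : Bnd n o (k + 1) < n := lt_of_lt_of_le hBnext hB2
      set P : Int := (PySem.List.pyRange (Bnd n o k) (Bnd n o (k + 1))).foldl (pvAInner values) 0 with hP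
      -- processing the boundary element from mid-state equals processing it from a fresh bucket state
      have hstep2 : pvBStep n o (acc, P, k, Bnd n o (k + 1))
            (Bnd n o (k + 1), PySem.List.pyGetD values (Bnd n o (k + 1)) 0)
          = pvBStep n o (acc ++ [P], 0, k + 1, Bnd n o (k + 1 + 1))
            (Bnd n o (k + 1), PySem.List.pyGetD values (Bnd n o (k + 1)) 0) := by
        have ht : ((Bnd n o (k + 1) : Int) == Bnd n o (k + 1)) = true := by simp
        have hf : ((Bnd n o (k + 1) : Int) == Bnd n o (k + 1 + 1)) = false := by simp; omega
        simp only [pvBStep, ht, hf, if_true, Bool.false_eq_true, if_false]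
        split <;> rfl
      rw [PySem.List.pyRange_one_cons hBltn]
      simp only [List.map_cons, List.foldl_cons]
      rw [hstep2]
      have hih := ih (k + 1) (by omega) hk1o (by omega) (acc ++ [P])
      simp only at hih
      rw [PySem.List.pyRange_one_cons hBltn] at hih
      simp only [List.map_cons, List.foldl_cons] at hih
      rw [hih]
      rw [PySem.List.pyRange_one_cons hko]
      simp [hP]

-- A's outer fold is a map over the bucket indices, with the dead 'end <= start' clamp removed
lemma aggA (values : List Int) (o : Int) (ho : ¬ o ≤ 0) (hn : ¬ (values.length : Int) ≤ o) :
    aggregate_bins values o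
      = (PySem.List.pyRange 0 o).map (fun i =>
          (PySem.List.pyRange (Bnd (values.length : Int) o i)
            (Bnd (values.length : Int) o (i + 1))).foldl (pvAInner values) 0) := by
  unfold aggregate_bins
  rw [if_neg ho]
  simp only [if_neg hn]
  rw [PySem.List.foldl_append_singleton_eq_map
      (f := fun idx =>
        let start := PySem.Int.floordiv (idx * (values.length : Int)) o
        let end0 := PySem.Int.floordiv ((idx + 1) * (values.length : Int)) o
        let end_ := if end0 ≤ start then start + 1 else end0
        (PySem.List.pyRange start end_).foldl (pvAInner values) 0)]
  rw [List.nil_append]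
  apply List.map_congr_left
  intro i hi
  rw [PySem.List.mem_pyRange_one] at hi
  have hclamp : ¬ Bnd (values.length : Int) o (i + 1) ≤ Bnd (values.length : Int) o i :=
    not_le.mpr (Bnd_strict (values.length : Int) o (by omega) (by omega) i)
  simp only [Bnd] at hclamp ⊢
  simp only [if_neg hclamp]

-- ===== VERDICT (by name: the statement is the Claim_ definition above) =====
theorem aggregate_bins_spec : Claim_equal_aggregate_bins := by
  intro values o _
  unfold Spec_aggregate_bins
  by_cases h0 : o ≤ 0
  · unfold aggregate_bins aggregate_bins_alt
    rw [if_pos h0, if_pos h0]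
  · by_cases h1 : (values.length : Int) ≤ o
    · unfold aggregate_bins aggregate_bins_alt
      rw [if_neg h0, if_neg h0]
      simp only [if_pos h1]
    · rw [aggA values o h0 h1]
      unfold aggregate_bins_alt
      rw [if_neg h0]
      simp only [if_neg h1]
      rw [PySem.List.enumerate_eq_map_pyRange values 0]
      have hmain := mainFold values o (by omega) (by omega) (o - 0).toNat 0 le_rfl (by omega) rfl []
      simp only at hmain
      rw [Bnd_zero] at hmain
      have hB1 : Bnd (values.length : Int) o (0 + 1) = PySem.Int.floordiv (values.length : Int) o := by
        simp [Bnd]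
      rw [hB1] at hmain
      simp only [PySem.List.len_eq] at *
      rw [hmain]
      simp
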